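-- pv_equiv track=rewrite | github.com/carminvuong/HOLMES-COMP-SCI | HTML AND PYTHON COMP SCI/hw56_step2.py | arrr
-- ===== SOURCE A (Python) =====
-- def findAllIndexes(desiderata, string):
--     # precondition: takes 2 strings
--     # postcondition: returns a list containing all the indexes where "desiderata" appear in "string"
--
--     indexes = []
--     for index, char in enumerate(string):
--         if char == desiderata:
--             indexes.append(index)
--     return indexes
--
-- def arrr(string):
--     # precondition: takes a string
--     # postcondition: returns a new string with "Arrr!" after every other sentence in "string"
--
--     finalString = ""
--     allIndexes = findAllIndexes("!", string)
--     everyOther = []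
--
--     for index in range(1, len(allIndexes), 2):
--         everyOther.append(allIndexes[index])
--
--     for index, char in enumerate(string):
--         if index in everyOther:
--             finalString += char + " Arrr!"
--         else:
--             finalString += char
--     return finalString
-- ===== SOURCE B (Python) =====
-- def arrr(string):
--     # Single streaming pass: count '!' as we go; after every even-numbered '!'
--     # append " Arrr!"  (no index table, no membership scan).
--     result = ""
--     bangs = 0
--     for ch in string:
--         result += ch
--         if ch == "!":
--             bangs += 1
--             if bangs % 2 == 0:
--                 result += " Arrr!"
--     return result
-- ===== Notes on version B (the rewrite author's own statement) =====
-- stated objective: simpler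
-- what changed: A builds the list of all exclamation-mark indexes, extracts every other one into a table, and rescans that table for membership at every character; B is a single streaming pass that keeps a running count of exclamation marks seen and appends the extra word right after every even-numbered one.
import Mathlib
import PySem

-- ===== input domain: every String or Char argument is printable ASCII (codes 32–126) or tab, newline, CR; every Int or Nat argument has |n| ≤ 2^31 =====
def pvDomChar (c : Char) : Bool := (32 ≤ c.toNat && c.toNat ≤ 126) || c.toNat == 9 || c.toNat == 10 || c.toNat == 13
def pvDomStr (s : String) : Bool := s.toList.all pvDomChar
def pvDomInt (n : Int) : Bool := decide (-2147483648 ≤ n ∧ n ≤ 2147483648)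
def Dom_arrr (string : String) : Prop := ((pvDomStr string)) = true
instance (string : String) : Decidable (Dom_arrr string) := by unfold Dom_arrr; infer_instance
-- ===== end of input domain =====

-- B replaces A's index-table + membership-scan construction by one streaming pass
-- with a running '!' counter (objective: simpler).

-- ===== PORT A =====
-- strings are handled as their code-point lists (string concatenation = list append,
-- string equality = list equality), exact for Python str
def findAllIndexes (desiderata : String) (string : String) : List Int :=
  (PySem.List.enumerate string.toList).foldl
    (fun indexes p => if [p.2] == desiderata.toList then indexes ++ [p.1] else indexes) []

def arrr (string : String) : String :=
  let allIndexes := findAllIndexes "!" string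
  let everyOther :=
    (PySem.List.pyRange 1 allIndexes.length 2).foldl
      (fun acc index => acc ++ [PySem.List.pyGetD allIndexes index 0]) []
  String.ofList
    ((PySem.List.enumerate string.toList).foldl
      (fun finalString p =>
        if p.1 ∈ everyOther then finalString ++ ([p.2] ++ " Arrr!".toList)
        else finalString ++ [p.2]) [])

-- ===== PORT B =====
def arrr_alt (string : String) : String :=
  String.ofList
    ((string.toList.foldl
      (fun (st : List Char × Int) ch =>
        let result := st.1 ++ [ch]
        if ch == '!' then
          let bangs := st.2 + 1
          if bangs % 2 == 0 then (result ++ " Arrr!".toList, bangs) else (result, bangs)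
        else (result, st.2))
      ([], 0)).1)

-- ===== PRECONDITION & SPEC =====
def Spec_arrr (string : String) (out : String) : Prop := out = arrr_alt string
instance (string : String) (out : String) : Decidable (Spec_arrr string out) := by unfold Spec_arrr; infer_instance

-- ===== CLAIM (what is proved, stated in full; the proofs are below) =====
def Claim_equal_arrr : Prop := ∀ (string : String), Dom_arrr string → Spec_arrr string (arrr string)

-- ===== LEMMAS AND PROOFS =====

-- positions (from k on) of '!' in a char list
def bangPos : List Char → Int → List Int
  | [], _ => []
  | c :: cs, k => (if c = '!' then [k] else []) ++ bangPos cs (k + 1)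

-- elements at odd positions (0-based) of a list
def oddsL : List Int → List Int
  | [] => []
  | [_] => []
  | _ :: b :: t => b :: oddsL t

def evensL : List Int → List Int
  | [] => []
  | a :: t => a :: oddsL t

def selOdd (b : Int) (L : List Int) : List Int := if b % 2 = 0 then oddsL L else evensL L

-- the common reference: output for the suffix cs when b bangs were already seen
def spec : List Char → Int → List Char
  | [], _ => []
  | c :: cs, b =>
    if c = '!' then
      (if (b + 1) % 2 = 0 then [c] ++ " Arrr!".toList else [c]) ++ spec cs (b + 1)
    else [c] ++ spec cs b

-- A's second loop as a structural function
def render : List Char → Int → List Int → List Char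
  | [], _, _ => []
  | c :: cs, k, E =>
    (if k ∈ E then [c] ++ " Arrr!".toList else [c]) ++ render cs (k + 1) E

theorem bang_toList : "!".toList = ['!'] := by decide

theorem findAllIndexes_eq (cs : List Char) :
    ∀ (k : Int) (acc : List Int),
      (PySem.List.enumerate cs k).foldl
        (fun indexes p => if [p.2] == "!".toList then indexes ++ [p.1] else indexes) acc
      = acc ++ bangPos cs k := by
  induction cs with
  | nil => intro k acc; simp [PySem.List.enumerate_nil, bangPos]
  | cons c cs ih =>
    intro k acc
    simp only [PySem.List.enumerate_cons, List.foldl_cons]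
    rw [ih]
    by_cases h : c = '!' <;> simp [h, bang_toList, bangPos]

theorem mem_bangPos_le {cs : List Char} : ∀ {k i : Int}, i ∈ bangPos cs k → k ≤ i := by
  induction cs with
  | nil => intro k i h; simp [bangPos] at h
  | cons c cs ih =>
    intro k i h
    simp only [bangPos, List.mem_append] at h
    rcases h with h | h
    · split at h <;> simp_all
    · have := ih h; omega

theorem mem_oddsL {L : List Int} {x : Int} (h : x ∈ oddsL L) : x ∈ L := by
  induction L using oddsL.induct with
  | case1 => simp [oddsL] at h
  | case2 => simp [oddsL] at h
  | case3 a b t ih =>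
    simp only [oddsL, List.mem_cons] at h ⊢
    rcases h with h | h
    · tauto
    · exact Or.inr (Or.inr (ih h))

theorem mem_evensL {L : List Int} {x : Int} (h : x ∈ evensL L) : x ∈ L := by
  cases L with
  | nil => simp [evensL] at h
  | cons a t =>
    simp only [evensL, List.mem_cons] at h ⊢
    rcases h with h | h
    · tauto
    · exact Or.inr (mem_oddsL h)

theorem mem_selOdd {b : Int} {L : List Int} {x : Int} (h : x ∈ selOdd b L) : x ∈ L := by
  unfold selOdd at h; split at h
  · exact mem_oddsL h
  · exact mem_evensL h

theorem oddsL_cons (a : Int) (t : List Int) : oddsL (a :: t) = evensL t := by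
  cases t <;> simp [oddsL, evensL]

-- pyRange step-2 facts
theorem pyRange_two_cons {a b : Int} (h : a < b) :
    PySem.List.pyRange a b 2 = a :: PySem.List.pyRange (a + 2) b 2 := by
  rw [PySem.List.pyRange_of_pos _ _ (by norm_num), PySem.List.pyRange_of_pos _ _ (by norm_num)]
  have h1 : ((b - a + 2 - 1) / 2).toNat
      = (if a + 2 < b then ((b - (a + 2) + 2 - 1) / 2).toNat else 0) + 1 := by
    split <;> omega
  rw [if_pos h, h1, List.range_succ_eq_map]
  simp only [List.map_cons, List.map_map, Function.comp_def, List.cons.injEq]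
  refine ⟨by norm_num, ?_⟩
  apply List.map_congr_left; intro k _
  simp only [Nat.succ_eq_add_one]; push_cast; ring

theorem pyRange_two_nil {a b : Int} (h : b ≤ a) : PySem.List.pyRange a b 2 = [] := by
  rw [PySem.List.pyRange_of_pos _ _ (by norm_num), if_neg (by omega)]
  simp

theorem pyRange_two_shift (n : Int) :
    PySem.List.pyRange (1 + 2) (n + 2) 2 = (PySem.List.pyRange 1 n 2).map (fun x => x + 2) := by
  rw [PySem.List.pyRange_of_pos _ _ (by norm_num), PySem.List.pyRange_of_pos _ _ (by norm_num)]
  have hiff : (1 + 2 < n + 2) ↔ (1 < n) := by omega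
  simp only [hiff]
  have hnum : (n + 2 - (1 + 2) + 2 - 1) = (n - 1 + 2 - 1) := by ring
  rw [hnum]
  simp only [List.map_map, Function.comp_def]
  apply List.map_congr_left; intro k _; push_cast; ring

-- A's everyOther construction extracts exactly the odd-position elements
theorem extract_eq_oddsL : ∀ (L : List Int),
    (PySem.List.pyRange 1 (L.length : Int) 2).map (fun i => PySem.List.pyGetD L i 0) = oddsL L := by
  intro L
  induction L using oddsL.induct with
  | case1 => rw [pyRange_two_nil (by simp)]; simp [oddsL]
  | case2 a => rw [pyRange_two_nil (by simp)]; simp [oddsL]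
  | case3 a c t ih =>
    have hlen : (((a :: c :: t).length : Nat) : Int) = (t.length : Int) + 2 := by simp; omega
    rw [hlen, pyRange_two_cons (by omega), pyRange_two_shift]
    simp only [List.map_cons, List.map_map, Function.comp_def, oddsL, List.cons.injEq]
    constructor
    · simp only [PySem.List.pyGetD, PySem.List.pyGet?, PySem.List.pyIdx?]
      rw [if_pos (by norm_num), if_pos (by push_cast [List.length_cons]; omega)]
      simp
    · rw [← ih]
      apply List.map_congr_left
      intro i hi
      have h1 : 1 ≤ i := ((PySem.List.mem_pyRange_iff_of_pos (by norm_num) i).mp hi).1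
      simp only [PySem.List.pyGetD, PySem.List.pyGet?, PySem.List.pyIdx?]
      by_cases h2 : i < (t.length : Int)
      · rw [if_pos (by omega), if_pos (by push_cast [List.length_cons]; omega),
            if_pos (by omega), if_pos (by omega)]
        congr 1
        have h3 : (i + 2).toNat = i.toNat + 2 := by omega
        simp [h3, List.getElem?_cons, show i.toNat + 2 - 1 = i.toNat + 1 by omega]
      · rw [if_pos (by omega), if_neg (by push_cast [List.length_cons]; omega),
            if_pos (by omega), if_neg (by omega)]
        simp

-- the second loop with accumulator equals render
theorem loopA_eq_render (E : List Int) : ∀ (cs : List Char) (k : Int) (acc : List Char),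
    (PySem.List.enumerate cs k).foldl
      (fun finalString p =>
        if p.1 ∈ E then finalString ++ ([p.2] ++ " Arrr!".toList)
        else finalString ++ [p.2]) acc
    = acc ++ render cs k E := by
  intro cs
  induction cs with
  | nil => intro k acc; simp [PySem.List.enumerate_nil, render]
  | cons c cs ih =>
    intro k acc
    simp only [PySem.List.enumerate_cons, List.foldl_cons, render]
    rw [ih]
    by_cases h : k ∈ E <;> simp [h, List.append_assoc]

-- membership in a selOdd of bangPos from k+1 never hits k
theorem not_mem_selOdd_bangPos {cs : List Char} {k b : Int} : k ∉ selOdd b (bangPos cs (k + 1)) := by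
  intro h
  have := mem_bangPos_le (mem_selOdd h)
  omega

-- render ignores list elements below the running index
theorem render_cons_lt : ∀ (cs : List Char) (k x : Int) (E : List Int), x < k →
    render cs k (x :: E) = render cs k E := by
  intro cs
  induction cs with
  | nil => intros; simp [render]
  | cons c cs ih =>
    intro k x E hx
    have hmem : (k ∈ x :: E) ↔ (k ∈ E) := by
      simp [List.mem_cons, show k ≠ x by omega]
    simp only [render, hmem, ih (k + 1) x E (by omega)]

-- main correspondence: A's render on the odd bang positions is spec
theorem render_eq_spec : ∀ (cs : List Char) (k b : Int),
    render cs k (selOdd b (bangPos cs k)) = spec cs b := by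
  intro cs
  induction cs with
  | nil => intros; simp [render, spec]
  | cons c cs ih =>
    intro k b
    have hb : b % 2 = 0 ∨ b % 2 = 1 := by omega
    by_cases hc : c = '!'
    · simp only [bangPos, List.singleton_append, render, spec, if_pos hc]
      rcases hb with hb | hb
      · rw [show selOdd b (k :: bangPos cs (k + 1)) = evensL (bangPos cs (k + 1)) by
            simp [selOdd, hb, oddsL_cons]]
        rw [if_neg (by
          intro h
          exact not_mem_selOdd_bangPos (b := b + 1)
            (by simpa [selOdd, show (b + 1) % 2 = 1 by omega] using h))]
        rw [if_neg (by omega)]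
        congr 1
        have h2 := ih (k + 1) (b + 1)
        rwa [show selOdd (b + 1) (bangPos cs (k + 1)) = evensL (bangPos cs (k + 1)) by
          simp [selOdd, show (b + 1) % 2 = 1 by omega]] at h2
      · rw [show selOdd b (k :: bangPos cs (k + 1)) = k :: oddsL (bangPos cs (k + 1)) by
            simp [selOdd, hb, evensL]]
        rw [if_pos (by simp), if_pos (by omega)]
        congr 1
        rw [render_cons_lt cs (k + 1) k _ (by omega)]
        have h2 := ih (k + 1) (b + 1)
        rwa [show selOdd (b + 1) (bangPos cs (k + 1)) = oddsL (bangPos cs (k + 1)) by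
          simp [selOdd, show (b + 1) % 2 = 0 by omega]] at h2
    · simp only [bangPos, List.nil_append, render, spec, if_neg hc]
      rw [if_neg (not_mem_selOdd_bangPos (b := b))]
      congr 1
      exact ih (k + 1) b

-- B's fold equals spec
theorem foldB_eq_spec : ∀ (cs : List Char) (acc : List Char) (b : Int),
    (cs.foldl
      (fun (st : List Char × Int) ch =>
        let result := st.1 ++ [ch]
        if ch == '!' then
          let bangs := st.2 + 1
          if bangs % 2 == 0 then (result ++ " Arrr!".toList, bangs) else (result, bangs)
        else (result, st.2))
      (acc, b)).1 = acc ++ spec cs b := by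
  intro cs
  induction cs with
  | nil => intros; simp [spec]
  | cons c cs ih =>
    intro acc b
    simp only [List.foldl_cons]
    by_cases hc : c = '!'
    · subst hc
      by_cases hp : (b + 1) % 2 = 0
      · simp only [beq_self_eq_true, if_true, show ((b + 1) % 2 == 0) = true by simp [hp]]
        rw [ih]
        simp [spec, hp, List.append_assoc]
      · simp only [beq_self_eq_true, if_true, show ((b + 1) % 2 == 0) = false by simp [hp]]
        rw [ih]
        simp [spec, hp, List.append_assoc]
    · simp only [show (c == '!') = false by simp [hc], Bool.false_eq_true, if_false]
      rw [ih]
      simp [spec, hc, List.append_assoc]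

-- ===== VERDICT (by name: the statement is the Claim_ definition above) =====
theorem arrr_spec : Claim_equal_arrr := by
  intro s _
  simp only [Spec_arrr, arrr, arrr_alt, findAllIndexes]
  simp only [findAllIndexes_eq, List.nil_append]
  simp only [PySem.List.foldl_append_singleton_eq_map, List.nil_append, extract_eq_oddsL]
  simp only [show oddsL (bangPos s.toList 0) = selOdd 0 (bangPos s.toList 0) from by
    simp [selOdd]]
  simp only [loopA_eq_render, List.nil_append]
  simp only [render_eq_spec]
  simp only [foldB_eq_spec, List.nil_append]
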